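-- pv_equiv track=rewrite | github.com/pypi-data/pypi-mirror-59 | packages/openlego/openlego-1.5.0.tar.gz/openlego-1.5.0/openlego/docs/_utils/docutil.py | extract_output_blocks
-- ===== SOURCE A (Python) =====
-- def extract_output_blocks(run_output):
--     """
--     Identify and extract outputs from source.
--
--     Parameters
--     ----------
--     run_output : str
--         Source code with outputs.
--
--     Returns
--     -------
--     list of str
--         List containing output text blocks.
--     """
--
--     output_blocks = []
--     # Look for start and end lines that look like this:
--     #  <<<<<4
--     #  >>>>>4
--     output_block = []
--     for line in run_output.splitlines():
--         if line.startswith('>>>>>'):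
--             output_blocks.append('\n'.join(output_block))
--             output_block = []
--         else:
--             output_block.append(line)
--
--     if output_block:
--         output_blocks.append('\n'.join(output_block))
--     return output_blocks
-- ===== SOURCE B (Python) =====
-- def extract_output_blocks(run_output):
--     """Recursive split-at-first-delimiter decomposition (same result as the
--     streaming accumulator version)."""
--     def go(lines):
--         for i, line in enumerate(lines):
--             if line.startswith('>>>>>'):
--                 return ['\n'.join(lines[:i])] + go(lines[i + 1:])
--         return ['\n'.join(lines)] if lines else []
--     return go(run_output.splitlines())
-- ===== Notes on version B (the rewrite author's own statement) =====
-- stated objective: alternative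
-- what changed: Replaces the single streaming accumulator-and-flush loop by a recursive decomposition that splits the line list at the first '>>>>>' delimiter, emits that slice joined, and recurses on the rest.
import Mathlib
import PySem

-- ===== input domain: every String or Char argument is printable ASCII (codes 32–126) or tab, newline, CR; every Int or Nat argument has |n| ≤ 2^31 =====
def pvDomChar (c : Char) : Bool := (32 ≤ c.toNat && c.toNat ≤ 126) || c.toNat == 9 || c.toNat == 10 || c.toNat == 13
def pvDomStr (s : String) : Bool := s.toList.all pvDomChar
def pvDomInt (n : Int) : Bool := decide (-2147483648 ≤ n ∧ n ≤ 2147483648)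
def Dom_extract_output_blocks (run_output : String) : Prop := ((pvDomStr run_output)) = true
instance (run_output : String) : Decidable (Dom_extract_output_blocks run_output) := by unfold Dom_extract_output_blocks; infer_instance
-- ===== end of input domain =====

-- B replaces A's streaming accumulator-and-flush loop by a recursive
-- split-at-first-delimiter decomposition (objective: alternative, same cost).

-- ===== PORT A =====
-- one iteration of A's for-loop over (output_blocks, output_block)
def pvStepA (st : List String × List String) (line : String) : List String × List String :=
  if PySem.Str.startswith line ">>>>>" then (st.1 ++ [PySem.Str.join "\n" st.2], [])
  else (st.1, st.2 ++ [line])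

def extract_output_blocks (run_output : String) : List String :=
  let st := (PySem.Str.splitlines run_output).foldl pvStepA ([], [])
  if st.2.isEmpty then st.1 else st.1 ++ [PySem.Str.join "\n" st.2]

-- ===== PORT B =====
-- Source B's go: find the first delimiter line; split there and recurse
def pvGoB (lines : List String) : List String :=
  match h : lines.findIdx? (fun l => PySem.Str.startswith l ">>>>>") with
  | some i =>
      PySem.Str.join "\n" (lines.take i) :: pvGoB (lines.drop (i + 1))
  | none => if lines.isEmpty then [] else [PySem.Str.join "\n" lines]
termination_by lines.length
decreasing_by
  have hi := List.findIdx?_eq_some_iff_findIdx_eq.mp h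
  simp [List.length_drop]
  omega

def extract_output_blocks_alt (run_output : String) : List String :=
  pvGoB (PySem.Str.splitlines run_output)

-- ===== PRECONDITION & SPEC =====
def Spec_extract_output_blocks (run_output : String) (out : List String) : Prop := out = extract_output_blocks_alt run_output
instance (run_output : String) (out : List String) : Decidable (Spec_extract_output_blocks run_output out) := by unfold Spec_extract_output_blocks; infer_instance

-- ===== CLAIM (what is proved, stated in full; the proofs are below) =====
def Claim_equal_extract_output_blocks : Prop := ∀ (run_output : String), Dom_extract_output_blocks run_output → Spec_extract_output_blocks run_output (extract_output_blocks run_output)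

-- ===== LEMMAS AND PROOFS =====

-- A's flush step, as a function of the final loop state (proof helper)
def pvFlush (st : List String × List String) : List String :=
  if st.2.isEmpty then st.1 else st.1 ++ [PySem.Str.join "\n" st.2]

theorem pvGoB_none (lines : List String)
    (h : lines.findIdx? (fun l => PySem.Str.startswith l ">>>>>") = none) :
    pvGoB lines = if lines.isEmpty then [] else [PySem.Str.join "\n" lines] := by
  rw [pvGoB]
  split
  · rename_i i heq
    rw [h] at heq
    simp at heq
  · rfl

theorem pvGoB_some (lines : List String) (i : Nat)
    (h : lines.findIdx? (fun l => PySem.Str.startswith l ">>>>>") = some i) :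
    pvGoB lines = PySem.Str.join "\n" (lines.take i) :: pvGoB (lines.drop (i + 1)) := by
  rw [pvGoB]
  split
  · rename_i j heq
    rw [h] at heq
    cases heq
    rfl
  · rename_i heq
    rw [h] at heq
    simp at heq

-- first delimiter index of cur ++ l :: ls is cur.length when cur is delimiter-free and l is one
theorem pvFindIdx_mid (cur : List String) (l : String) (ls : List String)
    (hcur : ∀ x ∈ cur, PySem.Str.startswith x ">>>>>" = false)
    (hl : PySem.Str.startswith l ">>>>>" = true) :
    (cur ++ l :: ls).findIdx? (fun s => PySem.Str.startswith s ">>>>>") = some cur.length := by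
  have hl' : PySem.Chars.startswith l.toList ['>', '>', '>', '>', '>'] = true := by simpa using hl
  rw [List.findIdx?_append, List.findIdx?_eq_none_iff.mpr hcur, List.findIdx?_cons]
  simp [hl']

-- A's loop from any delimiter-free accumulator, flushed, is blocks ++ pvGoB (cur ++ lines)
theorem pvFoldA_goB (lines : List String) :
    ∀ (blocks cur : List String),
    (∀ x ∈ cur, PySem.Str.startswith x ">>>>>" = false) →
    pvFlush (lines.foldl pvStepA (blocks, cur)) = blocks ++ pvGoB (cur ++ lines) := by
  induction lines with
  | nil =>
    intro blocks cur hcur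
    rw [List.foldl_nil, List.append_nil, pvGoB_none cur (List.findIdx?_eq_none_iff.mpr hcur)]
    cases cur <;> simp [pvFlush]
  | cons l ls ih =>
    intro blocks cur hcur
    by_cases hl : PySem.Str.startswith l ">>>>>" = true
    · have hl' : PySem.Chars.startswith l.toList ['>', '>', '>', '>', '>'] = true := by
        simpa using hl
      have hstep : List.foldl pvStepA (blocks, cur) (l :: ls)
          = List.foldl pvStepA (blocks ++ [PySem.Str.join "\n" cur], []) ls := by
        rw [List.foldl_cons]
        congr 1
        simp [pvStepA, hl']
      rw [hstep, ih (blocks ++ [PySem.Str.join "\n" cur]) [] (by simp),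
          pvGoB_some (cur ++ l :: ls) cur.length (pvFindIdx_mid cur l ls hcur hl)]
      simp
    · have hl' : PySem.Chars.startswith l.toList ['>', '>', '>', '>', '>'] = false := by
        simpa using hl
      have hstep : List.foldl pvStepA (blocks, cur) (l :: ls)
          = List.foldl pvStepA (blocks, cur ++ [l]) ls := by
        rw [List.foldl_cons]
        congr 1
        simp [pvStepA, hl']
      rw [hstep, ih blocks (cur ++ [l]) (by
        intro x hx
        rcases List.mem_append.mp hx with h | h
        · exact hcur x h
        · simp at h; subst h; simpa using hl)]
      simp

-- ===== VERDICT (by name: the statement is the Claim_ definition above) =====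
theorem extract_output_blocks_spec : Claim_equal_extract_output_blocks := by
  intro run_output _
  unfold Spec_extract_output_blocks extract_output_blocks extract_output_blocks_alt
  simpa [pvFlush] using pvFoldA_goB (PySem.Str.splitlines run_output) [] [] (by simp)
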